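-- pv_equiv track=rewrite | github.com/Nama21yo/Natnael_CP | G_Student_Councils.py | solve
-- ===== SOURCE A (Python) =====
-- def can_create(mid, nums, n ,k):
--     # mid * k >> the total possible
--     # min(mid, num) >> contribution on each group
--     return sum(min(mid, num) for num in nums) >= mid * k
--
-- def solve(nums, k,n):
--     l = -1
--     r = int(1e17) + 1
--     while r - l > 1:
--         mid = l + (r - l)//2
--         # TTTTTT T FFFFF monotonicity
--         if can_create(mid, nums,n, k):
--             l = mid
--         else:
--             r = mid
--     return l
-- ===== SOURCE B (Python) =====
-- def solve(nums, k, n):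
--     # Sort once and build prefix sums, so each probe of the binary search is
--     # evaluated in O(log n) by bisecting for the cutoff instead of rescanning nums.
--     xs = sorted(nums)
--     N = len(xs)
--     pre = [0]
--     for x in xs:
--         pre.append(pre[-1] + x)
--     l = -1
--     r = int(1e17) + 1
--     while r - l > 1:
--         mid = l + (r - l) // 2
--         # j = number of elements <= mid (hand-rolled bisect_right)
--         lo = 0
--         hi = N
--         while lo < hi:
--             m2 = (lo + hi) // 2
--             if xs[m2] <= mid:
--                 lo = m2 + 1
--             else:
--                 hi = m2
--         # sum(min(mid, num)) == pre[lo] + (N - lo) * mid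
--         if pre[lo] + (N - lo) * mid >= mid * k:
--             l = mid
--         else:
--             r = mid
--     return l
-- ===== Notes on version B (the rewrite author's own statement) =====
-- stated objective: faster
-- what changed: B sorts nums once and builds a prefix-sum array, then each of the ~57 binary-search probes is answered by bisecting for the cutoff j and reading pre[j] + (N-j)*mid in O(log n), so the per-probe full scan of nums disappears.
import Mathlib
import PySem

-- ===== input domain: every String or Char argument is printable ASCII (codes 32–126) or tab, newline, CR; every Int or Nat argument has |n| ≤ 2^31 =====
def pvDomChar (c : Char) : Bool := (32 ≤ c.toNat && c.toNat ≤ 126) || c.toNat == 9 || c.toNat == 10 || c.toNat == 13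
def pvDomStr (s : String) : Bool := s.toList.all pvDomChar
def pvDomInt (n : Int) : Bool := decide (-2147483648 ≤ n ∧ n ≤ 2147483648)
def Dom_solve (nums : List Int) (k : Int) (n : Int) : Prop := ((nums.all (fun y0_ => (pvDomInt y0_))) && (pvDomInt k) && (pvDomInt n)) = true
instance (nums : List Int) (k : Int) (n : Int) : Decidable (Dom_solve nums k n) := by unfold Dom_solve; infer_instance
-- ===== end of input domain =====

-- B sorts once and uses prefix sums + a bisect per probe instead of rescanning nums
-- for every probe of the outer binary search; return value only, no mutation.

-- ===== PORT A =====
-- sum(min(mid, num) for num in nums) >= mid * k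
def canCreate (mid : Int) (nums : List Int) (n : Int) (k : Int) : Bool :=
  decide (nums.foldl (fun acc num => acc + min mid num) 0 ≥ mid * k)

-- the while-loop of A, state (l, r)
def solveLoop (nums : List Int) (k : Int) (n : Int) (l r : Int) : Int :=
  if _h : r - l > 1 then
    let mid := l + PySem.Int.floordiv (r - l) 2
    if canCreate mid nums n k then solveLoop nums k n mid r
    else solveLoop nums k n l mid
  else l
termination_by (r - l).toNat
decreasing_by
  all_goals
    rw [PySem.Int.floordiv_eq_ediv_of_pos (by omega : (0:Int) < 2)]
    omega

def solve (nums : List Int) (k : Int) (n : Int) : Int :=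
  solveLoop nums k n (-1) (10 ^ 17 + 1)

-- ===== PORT B =====
-- inner while-loop of B: hand-rolled bisect_right; pyGetD is exact here because
-- the reachable states keep 0 ≤ lo ≤ hi ≤ len xs, so xs[m2] never raises
def bisLoop (xs : List Int) (mid : Int) (lo hi : Int) : Int :=
  if _h : lo < hi then
    let m2 := PySem.Int.floordiv (lo + hi) 2
    if PySem.List.pyGetD xs m2 0 ≤ mid then bisLoop xs mid (m2 + 1) hi
    else bisLoop xs mid lo m2
  else lo
termination_by (hi - lo).toNat
decreasing_by
  all_goals
    rw [PySem.Int.floordiv_eq_ediv_of_pos (by omega : (0:Int) < 2)]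
    omega

-- outer while-loop of B, state (l, r)
def altLoop (xs pre : List Int) (N k : Int) (l r : Int) : Int :=
  if _h : r - l > 1 then
    let mid := l + PySem.Int.floordiv (r - l) 2
    let j := bisLoop xs mid 0 N
    if PySem.List.pyGetD pre j 0 + (N - j) * mid ≥ mid * k then altLoop xs pre N k mid r
    else altLoop xs pre N k l mid
  else l
termination_by (r - l).toNat
decreasing_by
  all_goals
    rw [PySem.Int.floordiv_eq_ediv_of_pos (by omega : (0:Int) < 2)]
    omega

def solve_alt (nums : List Int) (k : Int) (n : Int) : Int :=
  let xs := PySem.List.sorted nums (fun x => x) false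
  let N : Int := xs.length
  let pre := xs.foldl (fun p x => p ++ [PySem.List.pyGetD p (-1) 0 + x]) [0]
  altLoop xs pre N k (-1) (10 ^ 17 + 1)

-- ===== PRECONDITION & SPEC =====
def Spec_solve (nums : List Int) (k : Int) (n : Int) (out : Int) : Prop := out = solve_alt nums k n
instance (nums : List Int) (k : Int) (n : Int) (out : Int) : Decidable (Spec_solve nums k n out) := by unfold Spec_solve; infer_instance

-- ===== CLAIM (what is proved, stated in full; the proofs are below) =====
def Claim_equal_solve : Prop := ∀ (nums : List Int) (k : Int) (n : Int), Dom_solve nums k n → Spec_solve nums k n (solve nums k n)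

-- ===== LEMMAS AND PROOFS =====

-- running prefix sums of a list, starting after s
def scanSum : Int → List Int → List Int
  | _, [] => []
  | s, x :: t => (s + x) :: scanSum (s + x) t

lemma foldl_pre (xs : List Int) (p : List Int) (s : Int) :
    List.foldl (fun p x => p ++ [PySem.List.pyGetD p (-1) 0 + x]) (p ++ [s]) xs
      = p ++ [s] ++ scanSum s xs := by
  induction xs generalizing p s with
  | nil => simp [scanSum]
  | cons x t ih =>
    have hg : PySem.List.pyGetD (p ++ [s]) (-1) 0 = s := by
      simp [PySem.List.pyGetD, PySem.List.pyGet?_neg_one]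
    simp only [List.foldl_cons, hg]
    have h2 := ih (p ++ [s]) (s + x)
    simp only [List.append_assoc] at h2 ⊢
    rw [h2]
    simp [scanSum]

lemma scan_get (xs : List Int) (s : Int) (j : Nat) (hj : j ≤ xs.length) :
    ([s] ++ scanSum s xs).getD j 0 = s + (xs.take j).sum := by
  induction xs generalizing s j with
  | nil =>
    have : j = 0 := by simpa using hj
    subst this
    simp
  | cons x t ih =>
    cases j with
    | zero => simp
    | succ j' =>
      have := ih (s + x) j' (by simpa using hj)
      simpa [scanSum, List.take_succ_cons, add_assoc] using this

lemma pre_getD (xs : List Int) (j : Nat) (hj : j ≤ xs.length) :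
    PySem.List.pyGetD (xs.foldl (fun p x => p ++ [PySem.List.pyGetD p (-1) 0 + x]) [0]) (j : Int) 0
      = (xs.take j).sum := by
  have h0 : (xs.foldl (fun p x => p ++ [PySem.List.pyGetD p (-1) 0 + x]) [0])
      = [(0:Int)] ++ scanSum 0 xs := by
    simpa using foldl_pre xs [] 0
  rw [h0, PySem.List.pyGetD_natCast]
  simpa using scan_get xs 0 j hj

-- the hand-rolled bisect returns the number of elements ≤ mid, on a sorted list
lemma bis_invariant (xs : List Int) (mid : Int) (hs : xs.Pairwise (· ≤ ·)) :
    ∀ (g : Nat) (lo hi : Int), (hi - lo).toNat ≤ g → 0 ≤ lo → lo ≤ hi → hi ≤ (xs.length : Int) →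
    (∀ i : Nat, (h : i < xs.length) → (i : Int) < lo → xs[i] ≤ mid) →
    (∀ i : Nat, (h : i < xs.length) → hi ≤ (i : Int) → mid < xs[i]) →
    bisLoop xs mid lo hi = (xs.countP (fun x => decide (x ≤ mid)) : Int) := by
  intro g
  induction g with
  | zero =>
    intro lo hi hg h0 hlh hhN hpre hsuf
    have hle : hi ≤ lo := by omega
    rw [bisLoop]
    simp only [dif_neg (by omega : ¬ lo < hi)]
    -- lo = hi; count the prefix
    have hlo : lo = hi := le_antisymm hlh hle
    have hcnt : xs.countP (fun x => decide (x ≤ mid)) = lo.toNat := by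
      have hsplit : xs = xs.take lo.toNat ++ xs.drop lo.toNat := (List.take_append_drop _ _).symm
      have hlen : lo.toNat ≤ xs.length := by omega
      have h1 : (xs.take lo.toNat).countP (fun x => decide (x ≤ mid)) = lo.toNat := by
        rw [List.countP_eq_length.mpr]
        · simp [Nat.min_eq_left hlen]
        · intro a ha
          obtain ⟨i, hi, rfl⟩ := List.mem_iff_getElem.mp ha
          have hi' : i < lo.toNat := by
            have := hi; simp [List.length_take] at this; omega
          have hilen : i < xs.length := by omega
          have := hpre i hilen (by omega)
          simpa [List.getElem_take] using this
      have h2 : (xs.drop lo.toNat).countP (fun x => decide (x ≤ mid)) = 0 := by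
        rw [List.countP_eq_zero]
        intro a ha
        obtain ⟨i, hi, rfl⟩ := List.mem_iff_getElem.mp ha
        have hilen : lo.toNat + i < xs.length := by
          have := hi; simp [List.length_drop] at this; omega
        have := hsuf (lo.toNat + i) hilen (by push_cast; omega)
        simp only [List.getElem_drop]
        simp only [decide_eq_true_eq]
        omega
      calc xs.countP (fun x => decide (x ≤ mid))
          = (xs.take lo.toNat ++ xs.drop lo.toNat).countP (fun x => decide (x ≤ mid)) := by rw [← hsplit]
        _ = lo.toNat := by rw [List.countP_append, h1, h2]; omega
    rw [hcnt]; omega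
  | succ g ih =>
    intro lo hi hg h0 hlh hhN hpre hsuf
    by_cases hlt : lo < hi
    · rw [bisLoop]
      simp only [dif_pos hlt]
      have hfd : PySem.Int.floordiv (lo + hi) 2 = (lo + hi) / 2 :=
        PySem.Int.floordiv_eq_ediv_of_pos (by omega)
      rw [hfd]
      set m2 : Int := (lo + hi) / 2 with hm2
      have hb : lo ≤ m2 ∧ m2 < hi := by rw [hm2]; omega
      have hm2len : m2.toNat < xs.length := by omega
      have hget : PySem.List.pyGetD xs m2 0 = xs[m2.toNat] := by
        rw [PySem.List.pyGetD_of_nonneg _ _ (by omega)]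
        exact List.getD_eq_getElem _ _ hm2len
      by_cases hcase : PySem.List.pyGetD xs m2 0 ≤ mid
      · rw [if_pos hcase]
        apply ih (m2 + 1) hi (by omega) (by omega) (by omega) hhN
        · intro i h hilt
          rcases lt_or_eq_of_le (by omega : (i : Int) ≤ m2) with hlt' | heq
          · have : xs[i] ≤ xs[m2.toNat] := by
              rcases Nat.lt_or_ge i m2.toNat with hio | hio
              · exact List.pairwise_iff_getElem.mp hs i m2.toNat h hm2len hio
              · have : i = m2.toNat := by omega
                subst this; rfl
            calc xs[i] ≤ xs[m2.toNat] := this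
              _ ≤ mid := by rw [← hget]; exact hcase
          · have : i = m2.toNat := by omega
            subst this
            rw [← hget]; exact hcase
        · exact hsuf
      · rw [if_neg hcase]
        apply ih lo m2 (by omega) (by omega) (by omega) (by omega) hpre
        intro i h hge
        have hx : mid < xs[m2.toNat] := by rw [← hget]; omega
        rcases Nat.lt_or_ge m2.toNat i with hio | hio
        · have : xs[m2.toNat] ≤ xs[i] := List.pairwise_iff_getElem.mp hs m2.toNat i hm2len h hio
          omega
        · have : i = m2.toNat := by omega
          subst this; exact hx
    · exact ih lo hi (by omega) h0 hlh hhN hpre hsuf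

lemma bis_eq_countP (xs : List Int) (mid : Int) (hs : xs.Pairwise (· ≤ ·)) :
    bisLoop xs mid 0 (xs.length : Int) = (xs.countP (fun x => decide (x ≤ mid)) : Int) := by
  apply bis_invariant xs mid hs (xs.length) 0 (xs.length : Int) (by omega) (by omega) (by omega) (by omega)
  · intro i h hlt; omega
  · intro i h hge
    exfalso
    have : (i : Int) < (xs.length : Int) := by exact_mod_cast h
    omega

-- Σ min(mid,x) over any list, split at the cutoff
lemma sum_min_split (mid : Int) (xs : List Int) :
    (xs.map (fun x => min mid x)).sum
      = (xs.filter (fun x => decide (x ≤ mid))).sum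
        + mid * ((xs.length : Int) - (xs.countP (fun x => decide (x ≤ mid)) : Int)) := by
  induction xs with
  | nil => simp
  | cons x t ih =>
    by_cases hx : x ≤ mid
    · have hmin : min mid x = x := min_eq_right hx
      simp only [List.map_cons, List.sum_cons, List.filter_cons, List.countP_cons, hx,
        decide_true, if_pos, List.length_cons, List.sum_cons, hmin]
      push_cast
      rw [ih]; ring
    · have hmin : min mid x = mid := min_eq_left (by omega)
      simp only [List.map_cons, List.sum_cons, List.filter_cons, List.countP_cons,
        List.length_cons, hmin]
      have hdx : decide (x ≤ mid) = false := by simp [hx]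
      rw [hdx]
      simp only [Bool.false_eq_true, if_false]
      push_cast
      rw [ih]; ring

-- on a sorted list, the first countP(≤mid) elements are exactly the elements ≤ mid
lemma take_countP (mid : Int) (xs : List Int) (hs : xs.Pairwise (· ≤ ·)) :
    xs.take (xs.countP (fun x => decide (x ≤ mid))) = xs.filter (fun x => decide (x ≤ mid)) := by
  induction xs with
  | nil => simp
  | cons x t ih =>
    have htail : t.Pairwise (· ≤ ·) := hs.tail
    by_cases hx : x ≤ mid
    · simp only [List.countP_cons, List.filter_cons, hx, decide_true,
        if_pos, List.take_succ_cons]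
      rw [ih htail]
    · have hdx : decide (x ≤ mid) = false := by simp [hx]
      have hcnt : t.countP (fun x => decide (x ≤ mid)) = 0 := by
        rw [List.countP_eq_zero]
        intro a ha
        have : x ≤ a := (List.pairwise_cons.mp hs).1 a ha
        simp only [decide_eq_true_eq]
        omega
      have hfil : t.filter (fun x => decide (x ≤ mid)) = [] := by
        rw [List.filter_eq_nil_iff]
        intro a ha
        have : x ≤ a := (List.pairwise_cons.mp hs).1 a ha
        simp only [decide_eq_true_eq]
        omega
      simp [hdx, hcnt, hfil]

-- the probe condition of B equals the probe sum of A, for every mid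
lemma pred_eq (nums : List Int) (mid : Int) :
    PySem.List.pyGetD
        ((PySem.List.sorted nums (fun x => x) false).foldl
          (fun p x => p ++ [PySem.List.pyGetD p (-1) 0 + x]) [0])
        (bisLoop (PySem.List.sorted nums (fun x => x) false) mid 0
          ((PySem.List.sorted nums (fun x => x) false).length : Int)) 0
      + (((PySem.List.sorted nums (fun x => x) false).length : Int)
          - bisLoop (PySem.List.sorted nums (fun x => x) false) mid 0
              ((PySem.List.sorted nums (fun x => x) false).length : Int)) * mid
      = nums.foldl (fun acc num => acc + min mid num) 0 := by
  set xs := PySem.List.sorted nums (fun x => x) false with hxs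
  have hperm : xs.Perm nums := PySem.List.sorted_perm nums (fun x => x) false
  have hs : xs.Pairwise (· ≤ ·) := PySem.List.sorted_pairwise nums (fun x => x)
  have hbis := bis_eq_countP xs mid hs
  set c := xs.countP (fun x => decide (x ≤ mid)) with hc
  have hcle : c ≤ xs.length := List.countP_le_length
  rw [hbis, pre_getD xs c hcle]
  rw [take_countP mid xs hs]
  have hfold : nums.foldl (fun acc num => acc + min mid num) 0
      = (nums.map (fun num => min mid num)).sum := by
    simpa using PySem.List.foldl_add nums (fun num => min mid num) 0
  rw [hfold]
  have hmapsum : (nums.map (fun num => min mid num)).sum = (xs.map (fun num => min mid num)).sum :=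
    ((hperm.map _).sum_eq).symm
  rw [hmapsum, sum_min_split mid xs]
  ring

-- the two while-loops agree from any state
lemma loops_eq (nums : List Int) (k n : Int) :
    ∀ (g : Nat) (l r : Int), (r - l).toNat ≤ g →
    solveLoop nums k n l r
      = altLoop (PySem.List.sorted nums (fun x => x) false)
          ((PySem.List.sorted nums (fun x => x) false).foldl
            (fun p x => p ++ [PySem.List.pyGetD p (-1) 0 + x]) [0])
          ((PySem.List.sorted nums (fun x => x) false).length : Int) k l r := by
  intro g
  induction g with
  | zero =>
    intro l r hg
    rw [solveLoop, altLoop]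
    simp only [dif_neg (by omega : ¬ r - l > 1)]
  | succ g ih =>
    intro l r hg
    by_cases hgap : r - l > 1
    · rw [solveLoop, altLoop]
      simp only [dif_pos hgap]
      have hfd : PySem.Int.floordiv (r - l) 2 = (r - l) / 2 :=
        PySem.Int.floordiv_eq_ediv_of_pos (by omega)
      rw [hfd]
      set mid : Int := l + (r - l) / 2 with hmid
      have hbnd : l < mid ∧ mid < r := by rw [hmid]; omega
      have hpred : canCreate mid nums n k
          = decide (PySem.List.pyGetD
              ((PySem.List.sorted nums (fun x => x) false).foldl
                (fun p x => p ++ [PySem.List.pyGetD p (-1) 0 + x]) [0])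
              (bisLoop (PySem.List.sorted nums (fun x => x) false) mid 0
                ((PySem.List.sorted nums (fun x => x) false).length : Int)) 0
            + (((PySem.List.sorted nums (fun x => x) false).length : Int)
                - bisLoop (PySem.List.sorted nums (fun x => x) false) mid 0
                    ((PySem.List.sorted nums (fun x => x) false).length : Int)) * mid
            ≥ mid * k) := by
        unfold canCreate
        rw [pred_eq nums mid]
      rw [hpred]
      by_cases hc : (PySem.List.pyGetD
              ((PySem.List.sorted nums (fun x => x) false).foldl
                (fun p x => p ++ [PySem.List.pyGetD p (-1) 0 + x]) [0])
              (bisLoop (PySem.List.sorted nums (fun x => x) false) mid 0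
                ((PySem.List.sorted nums (fun x => x) false).length : Int)) 0
            + (((PySem.List.sorted nums (fun x => x) false).length : Int)
                - bisLoop (PySem.List.sorted nums (fun x => x) false) mid 0
                    ((PySem.List.sorted nums (fun x => x) false).length : Int)) * mid
            ≥ mid * k)
      · simp only [hc, decide_true, if_pos]
        exact ih mid r (by omega)
      · simp only [hc, decide_false, Bool.false_eq_true, if_false]
        exact ih l mid (by omega)
    · rw [solveLoop, altLoop]
      simp only [dif_neg hgap]

-- ===== VERDICT (by name: the statement is the Claim_ definition above) =====
theorem solve_spec : Claim_equal_solve := by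
  intro nums k n _hdom
  unfold Spec_solve solve solve_alt
  exact loops_eq nums k n ((10 ^ 17 + 1) - (-1)).toNat (-1) (10 ^ 17 + 1) (by omega)
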